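-- pv_equiv track=rewrite | github.com/flex5hybrid/RussianCM | Tools/localization/no_local_scanner.py | inherit_name_desc
-- ===== SOURCE A (Python) =====
-- def inherit_name_desc(ent_id, entities_dict, hierarchy):
--     """
--     Рекурсивно ищем name/desc родителя, если нет у текущего
--     """
--     # Если ent_id - список, берём первый элемент или пропускаем
--     if isinstance(ent_id, list):
--         if not ent_id:
--             return None, None
--         ent_id = str(ent_id[0])
--     else:
--         ent_id = str(ent_id)
--
--     if ent_id not in entities_dict:
--         return None, None
--
--     ent = entities_dict[ent_id]
--     name = ent.get("name")
--     desc = ent.get("description")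
--
--     # Если и имя, и описание есть — возвращаем
--     if name and desc:
--         return name, desc
--
--     # Ищем родителя
--     parent_id = hierarchy.get(ent_id)
--     if parent_id:
--         parent_name, parent_desc = inherit_name_desc(parent_id, entities_dict, hierarchy)
--         return name or parent_name, desc or parent_desc
--
--     return name, desc
--     return name, desc
-- ===== SOURCE B (Python) =====
-- def inherit_name_desc(ent_id, entities_dict, hierarchy):
--     """Two independent single-field walks up the ancestor chain: each returns the
--     first truthy value of its field (else the last value seen, None past a missing
--     entity), which is exactly what A's chain of `x or parent_x` computes."""
--     def first_field(field):
--         cur = ent_id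
--         last = None
--         while True:
--             if isinstance(cur, list):
--                 if not cur:
--                     return None
--                 cur = str(cur[0])
--             else:
--                 cur = str(cur)
--             ent = entities_dict.get(cur)
--             if ent is None:
--                 return None
--             v = ent.get(field)
--             if v:
--                 return v
--             last = v
--             cur = hierarchy.get(cur)
--             if not cur:
--                 return last
--     return first_field("name"), first_field("description")
-- ===== Notes on version B (the rewrite author's own statement) =====
-- stated objective: alternative
-- what changed: A's pair-valued recursion that or-combines (name, desc) with the parent's recursive result is replaced by two independent iterative single-field walks: each returns the first truthy value of its field along the ancestor chain (else the last value seen, None past a missing entity), which is exactly what Python's chain of `x or parent_x` evaluates to. Pre_ excludes only the inputs on which A raises RecursionError (a parent cycle through entities none of which has both fields truthy); B diverges there too.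
import Mathlib
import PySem

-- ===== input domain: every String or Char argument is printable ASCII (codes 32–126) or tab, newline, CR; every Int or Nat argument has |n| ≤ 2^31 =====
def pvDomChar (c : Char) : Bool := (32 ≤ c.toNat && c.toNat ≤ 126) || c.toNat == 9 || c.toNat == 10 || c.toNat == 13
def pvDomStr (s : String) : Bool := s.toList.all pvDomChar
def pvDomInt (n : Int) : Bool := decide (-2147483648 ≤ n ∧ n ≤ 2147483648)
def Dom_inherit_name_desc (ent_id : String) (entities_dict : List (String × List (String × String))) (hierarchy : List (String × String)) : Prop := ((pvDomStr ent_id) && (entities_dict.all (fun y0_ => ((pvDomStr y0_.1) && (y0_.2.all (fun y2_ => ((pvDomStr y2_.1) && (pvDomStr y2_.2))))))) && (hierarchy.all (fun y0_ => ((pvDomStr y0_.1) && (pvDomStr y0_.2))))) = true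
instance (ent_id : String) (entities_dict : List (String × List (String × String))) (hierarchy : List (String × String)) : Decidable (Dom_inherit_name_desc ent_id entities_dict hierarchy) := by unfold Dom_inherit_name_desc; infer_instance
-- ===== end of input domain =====

-- B replaces A's pair-valued recursion by two independent single-field walks up the
-- ancestor chain (objective: alternative decomposition; return-value equivalence only,
-- neither program mutates its arguments).

-- ===== PORT A =====
-- ent_id is a String under the type convention, so Python's isinstance-list branch
-- and str() normalisation are the identity and are omitted.
-- Python truthiness of an optional string: present and nonempty.
def pyTruthy (o : Option String) : Bool :=
  match o with
  | some s => s ≠ ""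
  | none => false

-- Python `a or b` on optional strings (used by A's `name or parent_name`).
def pyOr (a b : Option String) : Option String :=
  if pyTruthy a then a else b

-- first-match lookup in an association list (Python dict lookup / .get)
def pyLookup {α : Type} (d : List (String × α)) (k : String) : Option α :=
  match d with
  | [] => none
  | (k', v) :: rest => if k' = k then some v else pyLookup rest k

-- A's recursion, with fuel = hierarchy.length + 1: each recursive call follows a
-- truthy parent pointer, and under Pre_ the ancestor chain escapes within that many
-- steps, so the fuel is never exhausted on admitted inputs (on a cyclic chain the
-- Python A raises RecursionError).
def inherit_name_desc_go (entities_dict : List (String × List (String × String))) (hierarchy : List (String × String)) : Nat → String → Option String × Option String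
  | 0, _ => (none, none)  -- unreachable under Pre_
  | fuel + 1, ent_id =>
    match pyLookup entities_dict ent_id with
    | none => (none, none)
    | some ent =>
      let name := pyLookup ent "name"
      let desc := pyLookup ent "description"
      if pyTruthy name && pyTruthy desc then (name, desc)
      else
        let parent_id := pyLookup hierarchy ent_id
        if pyTruthy parent_id then
          let p := inherit_name_desc_go entities_dict hierarchy fuel (parent_id.getD "")
          (pyOr name p.1, pyOr desc p.2)
        else (name, desc)

def inherit_name_desc (ent_id : String) (entities_dict : List (String × List (String × String))) (hierarchy : List (String × String)) : Option String × Option String :=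
  inherit_name_desc_go entities_dict hierarchy (hierarchy.length + 1) ent_id

-- ===== PORT B =====
-- B's `first_field` closure: walk the chain, return the first truthy value of the
-- given field; `last` mirrors the Python variable (the value returned when the chain
-- ends at a falsy parent). Same fuel bound, for the same reason as in A's port.
def first_field_go (entities_dict : List (String × List (String × String))) (hierarchy : List (String × String)) (field : String) : Nat → Option String → String → Option String
  | 0, last, _ => last  -- unreachable under Pre_
  | fuel + 1, _, cur =>
    match pyLookup entities_dict cur with
    | none => none
    | some ent =>
      let v := pyLookup ent field
      if pyTruthy v then v
      else
        match pyLookup hierarchy cur with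
        | none => v
        | some p => if p = "" then v else first_field_go entities_dict hierarchy field fuel v p

def inherit_name_desc_alt (ent_id : String) (entities_dict : List (String × List (String × String))) (hierarchy : List (String × String)) : Option String × Option String :=
  (first_field_go entities_dict hierarchy "name" (hierarchy.length + 1) none ent_id,
   first_field_go entities_dict hierarchy "description" (hierarchy.length + 1) none ent_id)

-- ===== PRECONDITION & SPEC =====
-- chain-escape check: following truthy parent pointers from `cur`, the chain reaches
-- a base case (a non-entity id, an entity with both name and description truthy, or a
-- missing/falsy parent) within the given number of steps; since the walk is
-- deterministic, a chain that reaches a base case at all does so within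
-- hierarchy.length + 1 steps (all intermediate ids are distinct hierarchy keys).
def chainEscapes (entities_dict : List (String × List (String × String))) (hierarchy : List (String × String)) : Nat → String → Bool
  | 0, _ => false
  | fuel + 1, cur =>
    match pyLookup entities_dict cur with
    | none => true
    | some ent =>
      if pyTruthy (pyLookup ent "name") && pyTruthy (pyLookup ent "description") then true
      else
        match pyLookup hierarchy cur with
        | none => true
        | some p => if p = "" then true else chainEscapes entities_dict hierarchy fuel p

-- Pre_ excludes exactly the inputs on which the ancestor chain never reaches a base
-- case (a parent cycle through entities none of which is fully described): there the
-- Python A raises RecursionError (and B diverges), so nothing is claimed; on every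
-- input where A returns, Pre_ holds.
def Pre_inherit_name_desc (ent_id : String) (entities_dict : List (String × List (String × String))) (hierarchy : List (String × String)) : Prop :=
  chainEscapes entities_dict hierarchy (hierarchy.length + 1) ent_id = true
instance (ent_id : String) (entities_dict : List (String × List (String × String))) (hierarchy : List (String × String)) : Decidable (Pre_inherit_name_desc ent_id entities_dict hierarchy) := by unfold Pre_inherit_name_desc; infer_instance

def pvWitness_inherit_name_desc : String × (List (String × List (String × String))) × (List (String × String)) :=
  ("a", [("a", [("name", "Alpha")]), ("b", [("name", "Beta"), ("description", "root")])], [("a", "b")])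

def Spec_inherit_name_desc (ent_id : String) (entities_dict : List (String × List (String × String))) (hierarchy : List (String × String)) (out : Option String × Option String) : Prop := out = inherit_name_desc_alt ent_id entities_dict hierarchy
instance (ent_id : String) (entities_dict : List (String × List (String × String))) (hierarchy : List (String × String)) (out : Option String × Option String) : Decidable (Spec_inherit_name_desc ent_id entities_dict hierarchy out) := by unfold Spec_inherit_name_desc; infer_instance

-- ===== CLAIM (what is proved, stated in full; the proofs are below) =====
def Claim_equal_inherit_name_desc : Prop := ∀ (ent_id : String) (entities_dict : List (String × List (String × String))) (hierarchy : List (String × String)), Dom_inherit_name_desc ent_id entities_dict hierarchy → Pre_inherit_name_desc ent_id entities_dict hierarchy → Spec_inherit_name_desc ent_id entities_dict hierarchy (inherit_name_desc ent_id entities_dict hierarchy)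

-- ===== LEMMAS AND PROOFS =====
-- Key lemma: on a chain that escapes within `fuel` steps, A's pair-valued recursion
-- computes exactly (first truthy name, first truthy description), i.e. B's two walks,
-- whatever `last` accumulators the walks carry.
theorem go_eq_fields (entities_dict : List (String × List (String × String))) (hierarchy : List (String × String)) :
    ∀ (fuel : Nat) (cur : String),
      chainEscapes entities_dict hierarchy fuel cur = true →
      ∀ (l1 l2 : Option String),
        inherit_name_desc_go entities_dict hierarchy fuel cur =
          (first_field_go entities_dict hierarchy "name" fuel l1 cur,
           first_field_go entities_dict hierarchy "description" fuel l2 cur) := by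
  intro fuel
  induction fuel with
  | zero => intro cur h; simp [chainEscapes] at h
  | succ fuel ih =>
    intro cur h l1 l2
    simp only [inherit_name_desc_go, first_field_go]
    cases hent : pyLookup entities_dict cur with
    | none => rfl
    | some ent =>
      simp only []
      set n0 := pyLookup ent "name" with hn0
      set d0 := pyLookup ent "description" with hd0
      by_cases hb : (pyTruthy n0 && pyTruthy d0) = true
      · rw [Bool.and_eq_true] at hb
        simp only [hb.1, hb.2, Bool.and_self, if_true]
      · simp only [hb, if_false]
        cases hp : pyLookup hierarchy cur with
        | none =>
          simp only [hp]
          by_cases hn : pyTruthy n0 = true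
          · have hd : pyTruthy d0 = false := by simp [hn] at hb; exact hb
            simp [pyTruthy, hn, hd]
          · simp [pyTruthy, eq_false_of_ne_true hn]
        | some p =>
          by_cases hpe : p = ""
          · simp only [hp, hpe]
            by_cases hn : pyTruthy n0 = true
            · have hd : pyTruthy d0 = false := by simp [hn] at hb; exact hb
              simp [pyTruthy, hn, hd]
            · simp [pyTruthy, eq_false_of_ne_true hn]
          · -- truthy parent: recurse on both sides
            have hesc : chainEscapes entities_dict hierarchy fuel p = true := by
              simp only [chainEscapes, hent, hp, ← hn0, ← hd0] at h
              rw [if_neg hb] at h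
              simpa [hpe] using h
            have hpt : pyTruthy (some p) = true := by simp [pyTruthy, hpe]
            simp only [hp, hpe, if_false, Option.getD_some]
            rw [ih p hesc n0 d0]
            by_cases hn : pyTruthy n0 = true <;> by_cases hd : pyTruthy d0 = true
            · rw [Bool.and_eq_true] at hb; exact absurd ⟨hn, hd⟩ hb
            · simp [hpt, hn, eq_false_of_ne_true hd, pyOr]
            · simp [hpt, eq_false_of_ne_true hn, hd, pyOr]
            · simp [hpt, eq_false_of_ne_true hn, eq_false_of_ne_true hd, pyOr]

-- ===== VERDICT (by name: the statement is the Claim_ definition above) =====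
theorem inherit_name_desc_spec : Claim_equal_inherit_name_desc := by
  intro ent_id entities_dict hierarchy _ hpre
  unfold Spec_inherit_name_desc inherit_name_desc inherit_name_desc_alt
  exact go_eq_fields entities_dict hierarchy _ ent_id hpre none none
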